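-- pv_equiv track=rewrite | github.com/drorhunvural/ED_OverCrowding_Predictions | validate_model.py | find_matching_scaler
-- ===== SOURCE A (Python) =====
-- def find_matching_scaler(scaler_files, dataset_name):
--     """
--     Find the appropriate scaler file for the dataset
--     """
--     # Look for target scaler first
--     target_scalers = [f for f in scaler_files if 'target' in f.lower()]
--     if target_scalers:
--         return target_scalers[0]
--
--     # Look for scaler with dataset name
--     name_scalers = [f for f in scaler_files if dataset_name in f]
--     if name_scalers:
--         return name_scalers[0]
--
--     # Return first scaler if available
--     if scaler_files:
--         return scaler_files[0]
--
--     return None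
-- ===== SOURCE B (Python) =====
-- def find_matching_scaler(scaler_files, dataset_name):
--     """Single pass: return immediately on a 'target' match; otherwise remember
--     the first dataset-name match and the first file seen."""
--     first_name = None
--     first_any = None
--     for f in scaler_files:
--         if 'target' in f.lower():
--             return f
--         if first_any is None:
--             first_any = f
--         if first_name is None and dataset_name in f:
--             first_name = f
--     return first_name if first_name is not None else first_any
-- ===== Notes on version B (the rewrite author's own statement) =====
-- stated objective: alternative
-- what changed: Replaced A's three list-comprehension passes (build target list, build name list, then fall back) by one short-circuiting loop that returns on the first 'target' hit and otherwise maintains first-name-match and first-file accumulators.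
import Mathlib
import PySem

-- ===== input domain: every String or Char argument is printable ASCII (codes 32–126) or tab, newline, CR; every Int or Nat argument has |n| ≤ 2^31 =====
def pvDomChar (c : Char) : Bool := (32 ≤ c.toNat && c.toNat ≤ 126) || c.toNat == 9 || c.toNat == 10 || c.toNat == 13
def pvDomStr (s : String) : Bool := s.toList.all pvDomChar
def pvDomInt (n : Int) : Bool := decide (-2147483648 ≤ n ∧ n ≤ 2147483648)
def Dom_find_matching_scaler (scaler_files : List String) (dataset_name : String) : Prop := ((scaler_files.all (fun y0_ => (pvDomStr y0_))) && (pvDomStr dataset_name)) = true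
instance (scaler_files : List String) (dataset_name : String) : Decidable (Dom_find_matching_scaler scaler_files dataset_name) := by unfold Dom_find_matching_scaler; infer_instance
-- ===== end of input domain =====

-- B replaces A's three filter passes by one short-circuiting scan with two accumulators (same cost, different decomposition).
-- ===== PORT A =====
-- A: three filter passes in priority order, each returning its first element.
def find_matching_scaler (scaler_files : List String) (dataset_name : String) : Option String :=
  let target_scalers := scaler_files.filter (fun f => PySem.Str.isIn "target" (PySem.Str.lower f))
  if target_scalers.isEmpty = false then target_scalers.head?
  else
    let name_scalers := scaler_files.filter (fun f => PySem.Str.isIn dataset_name f)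
    if name_scalers.isEmpty = false then name_scalers.head?
    else if scaler_files.isEmpty = false then scaler_files.head?
    else none

-- ===== PORT B =====
-- B: one short-circuiting scan with first-name-match / first-file accumulators.
def fms_go (dataset_name : String) : List String → Option String → Option String → Option String
  | [], first_name, first_any => first_name.orElse (fun _ => first_any)
  | f :: rest, first_name, first_any =>
    if PySem.Str.isIn "target" (PySem.Str.lower f) then some f
    else fms_go dataset_name rest
      (if first_name.isNone && PySem.Str.isIn dataset_name f then some f else first_name)
      (if first_any.isNone then some f else first_any)

def find_matching_scaler_alt (scaler_files : List String) (dataset_name : String) : Option String :=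
  fms_go dataset_name scaler_files none none

-- ===== PRECONDITION & SPEC =====
def Spec_find_matching_scaler (scaler_files : List String) (dataset_name : String) (out : Option String) : Prop := out = find_matching_scaler_alt scaler_files dataset_name
instance (scaler_files : List String) (dataset_name : String) (out : Option String) : Decidable (Spec_find_matching_scaler scaler_files dataset_name out) := by unfold Spec_find_matching_scaler; infer_instance

-- ===== CLAIM (what is proved, stated in full; the proofs are below) =====
def Claim_equal_find_matching_scaler : Prop := ∀ (scaler_files : List String) (dataset_name : String), Dom_find_matching_scaler scaler_files dataset_name → Spec_find_matching_scaler scaler_files dataset_name (find_matching_scaler scaler_files dataset_name)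

-- ===== LEMMAS AND PROOFS =====

-- ===== VERDICT (by name: the statement is the Claim_ definition above) =====

theorem fms_go_eq (d : String) : ∀ (xs : List String) (fn fa : Option String),
    fms_go d xs fn fa =
      (((xs.filter (fun f => PySem.Str.isIn "target" (PySem.Str.lower f))).head?).orElse (fun _ =>
        ((fn.orElse (fun _ => (xs.filter (fun f => PySem.Str.isIn d f)).head?)).orElse (fun _ =>
          fa.orElse (fun _ => xs.head?))))) := by
  intro xs
  induction xs with
  | nil => intro fn fa; cases fn <;> cases fa <;> rfl
  | cons f rest ih =>
    intro fn fa
    by_cases ht : PySem.Str.isIn "target" (PySem.Str.lower f) = true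
    · simp only [fms_go]
      rw [if_pos ht]
      simp only [List.filter_cons, ht, if_pos, List.head?_cons]
      rfl
    · simp only [fms_go]
      rw [if_neg ht, ih]
      simp only [List.filter_cons, ht]
      by_cases hn : PySem.Str.isIn d f = true <;>
        simp only [hn, if_pos, if_neg, Bool.false_eq_true, not_false_eq_true] <;>
        cases fn <;> cases fa <;> simp [Option.orElse]

theorem find_matching_scaler_spec : Claim_equal_find_matching_scaler := by
  intro xs d _
  unfold Spec_find_matching_scaler find_matching_scaler find_matching_scaler_alt
  rw [fms_go_eq]
  cases hT : (xs.filter (fun f => PySem.Str.isIn "target" (PySem.Str.lower f))).head? with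
  | some v =>
    have : (xs.filter (fun f => PySem.Str.isIn "target" (PySem.Str.lower f))).isEmpty = false := by
      cases h : xs.filter (fun f => PySem.Str.isIn "target" (PySem.Str.lower f)) with
      | nil => rw [h] at hT; exact absurd hT (by simp)
      | cons a as => rfl
    rw [if_pos this, hT]; rfl
  | none =>
    have hTe : (xs.filter (fun f => PySem.Str.isIn "target" (PySem.Str.lower f))).isEmpty = true := by
      rw [List.isEmpty_iff, ← List.head?_eq_none_iff]; exact hT
    rw [if_neg (by rw [hTe]; simp)]
    dsimp only
    cases hN : (xs.filter (fun f => PySem.Str.isIn d f)).head? with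
    | some w =>
      have : (xs.filter (fun f => PySem.Str.isIn d f)).isEmpty = false := by
        cases h : xs.filter (fun f => PySem.Str.isIn d f) with
        | nil => rw [h] at hN; exact absurd hN (by simp)
        | cons a as => rfl
      rw [if_pos this]; rfl
    | none =>
      have hNe : (xs.filter (fun f => PySem.Str.isIn d f)).isEmpty = true := by
        rw [List.isEmpty_iff, ← List.head?_eq_none_iff]; exact hN
      rw [if_neg (by rw [hNe]; simp)]
      cases xs with
      | nil => rfl
      | cons a as => rw [if_pos (by simp)]; rfl
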